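-- pv_equiv track=rewrite | github.com/vojtaSob/SpamFilter | test_quality_for_corpus.py | n_FP_n_FN
-- ===== SOURCE A (Python) =====
-- SPAM_TAG = 'SPAM'
--
-- HAM_TAG = 'OK'
--
-- def n_FP_n_FN(orig_dict, n_fp=1, n_fn=2):
--     """Return a dict with predifined numbers of FP and FN."""
--     new_dict = {}
--     fp = fn = 0
--     for email_fname, true_class in orig_dict.items():
--         if fp < n_fp and true_class == HAM_TAG:
--             new_dict[email_fname] = SPAM_TAG
--             fp += 1
--         elif fn < n_fn and true_class == SPAM_TAG:
--             new_dict[email_fname] = HAM_TAG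
--             fn += 1
--         else:
--             new_dict[email_fname] = true_class
--     return new_dict
-- ===== SOURCE B (Python) =====
-- SPAM_TAG = 'SPAM'
--
-- HAM_TAG = 'OK'
--
-- def n_FP_n_FN(orig_dict, n_fp=1, n_fn=2):
--     """Return a dict with predefined numbers of FP and FN.
--
--     Two-phase: first pick the keys to flip, then emit the dict in one
--     comprehension."""
--     fp_set = set()
--     fn_set = set()
--     for email_fname, true_class in orig_dict.items():
--         if true_class == HAM_TAG and len(fp_set) < n_fp:
--             fp_set.add(email_fname)
--         elif true_class == SPAM_TAG and len(fn_set) < n_fn: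
--             fn_set.add(email_fname)
--     return {k: (SPAM_TAG if k in fp_set else HAM_TAG if k in fn_set else v)
--             for k, v in orig_dict.items()}
-- ===== Notes on version B (the rewrite author's own statement) =====
-- stated objective: alternative
-- what changed: Replaces A's single counter-driven loop that builds the dict while counting flips with a two-phase pass: first collect the sets of keys to flip (first n_fp HAMs, first n_fn SPAMs), then emit the whole dict in one comprehension keyed on set membership; Pre_ only excludes association lists with duplicate keys, which cannot arise from a Python dict argument.
import Mathlib
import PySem

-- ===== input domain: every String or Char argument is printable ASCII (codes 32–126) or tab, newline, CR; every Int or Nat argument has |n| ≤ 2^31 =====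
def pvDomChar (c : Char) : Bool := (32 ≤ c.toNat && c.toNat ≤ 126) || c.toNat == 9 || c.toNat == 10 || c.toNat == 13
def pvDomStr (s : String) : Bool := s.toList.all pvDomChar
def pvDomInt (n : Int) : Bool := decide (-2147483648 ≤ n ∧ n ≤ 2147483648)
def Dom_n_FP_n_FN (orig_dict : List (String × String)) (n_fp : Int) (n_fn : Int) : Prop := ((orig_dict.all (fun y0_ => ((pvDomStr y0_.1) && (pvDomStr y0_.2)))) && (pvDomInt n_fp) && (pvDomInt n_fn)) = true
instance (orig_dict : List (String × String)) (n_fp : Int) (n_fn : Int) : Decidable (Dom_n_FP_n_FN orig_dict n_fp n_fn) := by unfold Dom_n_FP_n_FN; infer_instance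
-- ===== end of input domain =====

-- B builds the result in two phases (pick the key sets to flip, then emit the dict by set
-- membership) instead of A's counter-driven single loop; objective: alternative (same cost).

-- ===== PORT A =====
-- literal port of A: one loop carrying the state (new_dict, fp, fn)
def stepA (n_fp : Int) (n_fn : Int) (st : PySem.Dict String String × Int × Int)
    (kv : String × String) : PySem.Dict String String × Int × Int :=
  if st.2.1 < n_fp ∧ kv.2 = "OK" then (st.1.insert kv.1 "SPAM", st.2.1 + 1, st.2.2)
  else if st.2.2 < n_fn ∧ kv.2 = "SPAM" then (st.1.insert kv.1 "OK", st.2.1, st.2.2 + 1)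
  else (st.1.insert kv.1 kv.2, st.2)

def n_FP_n_FN (orig_dict : List (String × String)) (n_fp : Int) (n_fn : Int) : List (String × String) :=
  (orig_dict.foldl (stepA n_fp n_fn) (PySem.Dict.empty, 0, 0)).1.items

-- ===== PORT B =====
-- phase 1 of B: collect the sets of keys that will be flipped
def stepPick (n_fp : Int) (n_fn : Int) (s : PySem.Set String × PySem.Set String)
    (kv : String × String) : PySem.Set String × PySem.Set String :=
  if kv.2 = "OK" ∧ PySem.Set.len s.1 < n_fp then (PySem.Set.add s.1 kv.1, s.2)
  else if kv.2 = "SPAM" ∧ PySem.Set.len s.2 < n_fn then (s.1, PySem.Set.add s.2 kv.1)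
  else s

def pickFlipSets (orig_dict : List (String × String)) (n_fp : Int) (n_fn : Int) :
    PySem.Set String × PySem.Set String :=
  orig_dict.foldl (stepPick n_fp n_fn) (PySem.Set.empty, PySem.Set.empty)

-- phase 2 of B: the dict comprehension over orig_dict
def emitDict (orig_dict : List (String × String)) (fs : PySem.Set String × PySem.Set String) : List (String × String) :=
  (orig_dict.foldl
    (fun (d : PySem.Dict String String) kv =>
      d.insert kv.1 (if PySem.Set.contains fs.1 kv.1 then "SPAM"
                     else if PySem.Set.contains fs.2 kv.1 then "OK" else kv.2))
    PySem.Dict.empty).items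

def n_FP_n_FN_alt (orig_dict : List (String × String)) (n_fp : Int) (n_fn : Int) : List (String × String) :=
  emitDict orig_dict (pickFlipSets orig_dict n_fp n_fn)

-- ===== PRECONDITION & SPEC =====
-- Pre_ excludes association lists with duplicate keys: the Python argument is a dict, whose
-- items() can never repeat a key, so such lists represent no actual input of A.
def Pre_n_FP_n_FN (orig_dict : List (String × String)) (n_fp : Int) (n_fn : Int) : Prop :=
  (orig_dict.map Prod.fst).Nodup
instance (orig_dict : List (String × String)) (n_fp : Int) (n_fn : Int) : Decidable (Pre_n_FP_n_FN orig_dict n_fp n_fn) := by unfold Pre_n_FP_n_FN; infer_instance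

def pvWitness_n_FP_n_FN : (List (String × String)) × Int × Int :=
  ([("a.eml", "OK"), ("b.eml", "SPAM"), ("c.eml", "OK"), ("d.eml", "weird")], 1, 2)

def Spec_n_FP_n_FN (orig_dict : List (String × String)) (n_fp : Int) (n_fn : Int) (out : List (String × String)) : Prop := out = n_FP_n_FN_alt orig_dict n_fp n_fn
instance (orig_dict : List (String × String)) (n_fp : Int) (n_fn : Int) (out : List (String × String)) : Decidable (Spec_n_FP_n_FN orig_dict n_fp n_fn out) := by unfold Spec_n_FP_n_FN; infer_instance

-- ===== CLAIM (what is proved, stated in full; the proofs are below) =====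
def Claim_equal_n_FP_n_FN : Prop := ∀ (orig_dict : List (String × String)) (n_fp : Int) (n_fn : Int), Dom_n_FP_n_FN orig_dict n_fp n_fn → Pre_n_FP_n_FN orig_dict n_fp n_fn → Spec_n_FP_n_FN orig_dict n_fp n_fn (n_FP_n_FN orig_dict n_fp n_fn)

-- ===== LEMMAS AND PROOFS =====

-- common reference function: one recursive flipping pass over remaining budgets
def mapFlip : List (String × String) → Int → Int → List (String × String)
  | [], _, _ => []
  | kv :: rest, a, b =>
    if kv.2 = "OK" ∧ 0 < a then (kv.1, "SPAM") :: mapFlip rest (a - 1) b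
    else if kv.2 = "SPAM" ∧ 0 < b then (kv.1, "OK") :: mapFlip rest a (b - 1)
    else kv :: mapFlip rest a b

-- the flipped key sets, recursively over remaining budgets
def flipKeys : List (String × String) → Int → Int → List String × List String
  | [], _, _ => ([], [])
  | kv :: rest, a, b =>
    if kv.2 = "OK" ∧ 0 < a then
      (kv.1 :: (flipKeys rest (a - 1) b).1, (flipKeys rest (a - 1) b).2)
    else if kv.2 = "SPAM" ∧ 0 < b then
      ((flipKeys rest a (b - 1)).1, kv.1 :: (flipKeys rest a (b - 1)).2)
    else flipKeys rest a b

theorem flipKeys_subset (l : List (String × String)) (a b : Int) :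
    (∀ k ∈ (flipKeys l a b).1, k ∈ l.map Prod.fst) ∧
    (∀ k ∈ (flipKeys l a b).2, k ∈ l.map Prod.fst) := by
  induction l generalizing a b with
  | nil => simp [flipKeys]
  | cons kv rest ih =>
    simp only [flipKeys]
    split_ifs with h1 h2 <;> constructor <;> intro k hk <;>
      simp only [List.map_cons, List.mem_cons] at * <;>
      first
        | (rcases hk with h | h
           · exact Or.inl h
           · exact Or.inr ((ih _ _).1 _ h))
        | (rcases hk with h | h
           · exact Or.inl h
           · exact Or.inr ((ih _ _).2 _ h))
        | exact Or.inr ((ih _ _).1 _ hk)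
        | exact Or.inr ((ih _ _).2 _ hk)

-- A's loop, generalized: starting from dict d and counters (fp, fn), with all remaining keys
-- fresh and distinct, the loop appends exactly mapFlip of the remaining budgets.
theorem foldA_items (n_fp n_fn : Int) :
    ∀ (l : List (String × String)) (d : PySem.Dict String String) (fp fn : Int),
      (d.keys ++ l.map Prod.fst).Nodup →
      (l.foldl (stepA n_fp n_fn) (d, fp, fn)).1.items
        = d.items ++ mapFlip l (n_fp - fp) (n_fn - fn) := by
  intro l
  induction l with
  | nil => intro d fp fn _; simp [mapFlip]
  | cons kv rest ih =>
    intro d fp fn hnd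
    have hsplit := List.nodup_append.mp hnd
    have hk : kv.1 ∉ d.keys := fun hmem =>
      hsplit.2.2 kv.1 hmem kv.1 (by simp) rfl
    have hc : d.contains kv.1 = false := by
      rw [Bool.eq_false_iff]
      intro h
      exact hk ((PySem.Dict.contains_iff_mem_keys _ _).mp h)
    have hstep : ∀ w, ((d.insert kv.1 w).keys ++ rest.map Prod.fst).Nodup := by
      intro w
      rw [PySem.Dict.keys_insert_of_not_contains _ _ hc]
      have : (d.keys ++ [kv.1]) ++ rest.map Prod.fst = d.keys ++ kv.1 :: rest.map Prod.fst := by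
        simp
      rw [this]
      simpa using hnd
    have hitems : ∀ w, (d.insert kv.1 w).items = d.items ++ [(kv.1, w)] :=
      fun w => PySem.Dict.items_insert_of_not_contains _ _ hc
    simp only [List.foldl_cons]
    by_cases h1 : fp < n_fp ∧ kv.2 = "OK"
    · have : stepA n_fp n_fn (d, fp, fn) kv = (d.insert kv.1 "SPAM", fp + 1, fn) := by
        simp only [stepA]; rw [if_pos]; exact ⟨h1.1, h1.2⟩
      rw [this, ih _ _ _ (hstep "SPAM"), hitems "SPAM"]
      have hm : mapFlip (kv :: rest) (n_fp - fp) (n_fn - fn)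
          = (kv.1, "SPAM") :: mapFlip rest (n_fp - fp - 1) (n_fn - fn) := by
        simp only [mapFlip]; rw [if_pos]; exact ⟨h1.2, by omega⟩
      rw [hm]
      have harith : n_fp - (fp + 1) = n_fp - fp - 1 := by ring
      rw [harith]
      simp
    · by_cases h2 : fn < n_fn ∧ kv.2 = "SPAM"
      · have : stepA n_fp n_fn (d, fp, fn) kv = (d.insert kv.1 "OK", fp, fn + 1) := by
          simp only [stepA]; rw [if_neg, if_pos]; exact ⟨h2.1, h2.2⟩
          exact fun h => h1 ⟨h.1, h.2⟩
        rw [this, ih _ _ _ (hstep "OK"), hitems "OK"]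
        have hm : mapFlip (kv :: rest) (n_fp - fp) (n_fn - fn)
            = (kv.1, "OK") :: mapFlip rest (n_fp - fp) (n_fn - fn - 1) := by
          simp only [mapFlip]
          rw [if_neg, if_pos]
          · exact ⟨h2.2, by omega⟩
          · intro h; exact h1 ⟨by omega, h.1⟩
        rw [hm]
        have harith : n_fn - (fn + 1) = n_fn - fn - 1 := by ring
        rw [harith]
        simp
      · have : stepA n_fp n_fn (d, fp, fn) kv = (d.insert kv.1 kv.2, fp, fn) := by
          simp only [stepA]; rw [if_neg, if_neg]
          · exact fun h => h2 ⟨h.1, h.2⟩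
          · exact fun h => h1 ⟨h.1, h.2⟩
        rw [this, ih _ _ _ (hstep kv.2), hitems kv.2]
        have hm : mapFlip (kv :: rest) (n_fp - fp) (n_fn - fn)
            = kv :: mapFlip rest (n_fp - fp) (n_fn - fn) := by
          simp only [mapFlip]
          rw [if_neg, if_neg]
          · intro h; exact h2 ⟨by omega, h.1⟩
          · intro h; exact h1 ⟨by omega, h.1⟩
        rw [hm]
        simp

-- B's first pass, generalized: from sets (s1, s2) disjoint from the remaining distinct keys,
-- the loop appends exactly the flipKeys of the remaining budgets.
theorem foldPick_eq (n_fp n_fn : Int) :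
    ∀ (l : List (String × String)) (s1 s2 : PySem.Set String),
      (l.map Prod.fst).Nodup →
      (∀ k ∈ l.map Prod.fst, k ∉ s1 ∧ k ∉ s2) →
      l.foldl (stepPick n_fp n_fn) (s1, s2)
        = (s1 ++ (flipKeys l (n_fp - PySem.Set.len s1) (n_fn - PySem.Set.len s2)).1,
           s2 ++ (flipKeys l (n_fp - PySem.Set.len s1) (n_fn - PySem.Set.len s2)).2) := by
  intro l
  induction l with
  | nil => intro s1 s2 _ _; simp [flipKeys]
  | cons kv rest ih =>
    intro s1 s2 hnd hfresh
    have hnd' : (rest.map Prod.fst).Nodup := by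
      simpa using hnd.of_cons
    have hknotin : kv.1 ∉ rest.map Prod.fst := by
      have := hnd
      simp only [List.map_cons, List.nodup_cons] at this
      exact this.1
    have hfkv := hfresh kv.1 (by simp)
    have hlen : ∀ (s : PySem.Set String) (x : String),
        x ∉ s → PySem.Set.len (PySem.Set.add s x) = PySem.Set.len s + 1 := by
      intro s x hx
      rw [PySem.Set.add_of_not_mem hx]
      simp [PySem.Set.len]
    simp only [List.foldl_cons]
    by_cases h1 : kv.2 = "OK" ∧ PySem.Set.len s1 < n_fp
    · have hs : stepPick n_fp n_fn (s1, s2) kv = (PySem.Set.add s1 kv.1, s2) := by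
        simp only [stepPick]; rw [if_pos h1]
      rw [hs, ih _ _ hnd' ?_]
      · have hf : flipKeys (kv :: rest) (n_fp - PySem.Set.len s1) (n_fn - PySem.Set.len s2)
            = (kv.1 :: (flipKeys rest (n_fp - PySem.Set.len s1 - 1) (n_fn - PySem.Set.len s2)).1,
               (flipKeys rest (n_fp - PySem.Set.len s1 - 1) (n_fn - PySem.Set.len s2)).2) := by
          simp only [flipKeys]; rw [if_pos]; exact ⟨h1.1, by omega⟩
        rw [hf, hlen s1 kv.1 hfkv.1]
        have harith : n_fp - (PySem.Set.len s1 + 1) = n_fp - PySem.Set.len s1 - 1 := by ring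
        rw [harith, PySem.Set.add_of_not_mem hfkv.1]
        simp
      · intro k hkrest
        have hne : k ≠ kv.1 := fun he => hknotin (he ▸ hkrest)
        have := hfresh k (by simp [hkrest])
        rw [PySem.Set.add_of_not_mem hfkv.1]
        refine ⟨?_, this.2⟩
        simp only [List.mem_append, List.mem_singleton]
        rintro (h | h)
        · exact this.1 h
        · exact hne h
    · by_cases h2 : kv.2 = "SPAM" ∧ PySem.Set.len s2 < n_fn
      · have hs : stepPick n_fp n_fn (s1, s2) kv = (s1, PySem.Set.add s2 kv.1) := by
          simp only [stepPick]; rw [if_neg h1, if_pos h2]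
        rw [hs, ih _ _ hnd' ?_]
        · have hf : flipKeys (kv :: rest) (n_fp - PySem.Set.len s1) (n_fn - PySem.Set.len s2)
              = ((flipKeys rest (n_fp - PySem.Set.len s1) (n_fn - PySem.Set.len s2 - 1)).1,
                 kv.1 :: (flipKeys rest (n_fp - PySem.Set.len s1) (n_fn - PySem.Set.len s2 - 1)).2) := by
            simp only [flipKeys]
            rw [if_neg, if_pos]
            · exact ⟨h2.1, by omega⟩
            · intro h; exact h1 ⟨h.1, by omega⟩
          rw [hf, hlen s2 kv.1 hfkv.2]
          have harith : n_fn - (PySem.Set.len s2 + 1) = n_fn - PySem.Set.len s2 - 1 := by ring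
          rw [harith, PySem.Set.add_of_not_mem hfkv.2]
          simp
        · intro k hkrest
          have hne : k ≠ kv.1 := fun he => hknotin (he ▸ hkrest)
          have := hfresh k (by simp [hkrest])
          rw [PySem.Set.add_of_not_mem hfkv.2]
          refine ⟨this.1, ?_⟩
          simp only [List.mem_append, List.mem_singleton]
          rintro (h | h)
          · exact this.2 h
          · exact hne h
      · have hs : stepPick n_fp n_fn (s1, s2) kv = (s1, s2) := by
          simp only [stepPick]; rw [if_neg h1, if_neg h2]
        rw [hs, ih _ _ hnd' (fun k hk => hfresh k (by simp [hk]))]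
        have hf : flipKeys (kv :: rest) (n_fp - PySem.Set.len s1) (n_fn - PySem.Set.len s2)
            = flipKeys rest (n_fp - PySem.Set.len s1) (n_fn - PySem.Set.len s2) := by
          simp only [flipKeys]
          rw [if_neg, if_neg]
          · intro h; exact h2 ⟨h.1, by omega⟩
          · intro h; exact h1 ⟨h.1, by omega⟩
        rw [hf]

-- mapping each entry through membership in the global flipKeys sets equals mapFlip
theorem map_flipKeys_eq (l : List (String × String)) :
    ∀ (a b : Int), (l.map Prod.fst).Nodup →
      l.map (fun kv => (kv.1,
        if PySem.Set.contains (flipKeys l a b).1 kv.1 then "SPAM"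
        else if PySem.Set.contains (flipKeys l a b).2 kv.1 then "OK" else kv.2))
      = mapFlip l a b := by
  induction l with
  | nil => intro a b _; simp [flipKeys, mapFlip]
  | cons kv rest ih =>
    intro a b hnd
    have hnd' : (rest.map Prod.fst).Nodup := by simpa using hnd.of_cons
    have hknotin : kv.1 ∉ rest.map Prod.fst := by
      have := hnd
      simp only [List.map_cons, List.nodup_cons] at this
      exact this.1
    have hnotG : ∀ (a' b' : Int), kv.1 ∉ (flipKeys rest a' b').1 ∧ kv.1 ∉ (flipKeys rest a' b').2 := by
      intro a' b'
      exact ⟨fun h => hknotin ((flipKeys_subset rest a' b').1 _ h),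
             fun h => hknotin ((flipKeys_subset rest a' b').2 _ h)⟩
    have hcontains_false : ∀ (G : List String), kv.1 ∉ G → PySem.Set.contains G kv.1 = false := by
      intro G hG
      rw [Bool.eq_false_iff]
      intro h
      exact hG ((PySem.Set.contains_iff _ _).mp h)
    have hcontains_cons : ∀ (G : List String) (x : String), x ≠ kv.1 →
        PySem.Set.contains (kv.1 :: G) x = PySem.Set.contains G x := by
      intro G x hx
      rcases hb : PySem.Set.contains G x with _ | _
      · rw [Bool.eq_false_iff] at hb ⊢
        intro h
        have := (PySem.Set.contains_iff _ _).mp h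
        rcases List.mem_cons.mp this with h' | h'
        · exact hx h'
        · exact hb ((PySem.Set.contains_iff _ _).mpr h')
      · exact (PySem.Set.contains_iff _ _).mpr (List.mem_cons_of_mem _ ((PySem.Set.contains_iff _ _).mp hb))
    have htail : ∀ (F1 F2 G1 G2 : List String),
        (∀ x ∈ rest, PySem.Set.contains F1 x.1 = PySem.Set.contains G1 x.1) →
        (∀ x ∈ rest, PySem.Set.contains F2 x.1 = PySem.Set.contains G2 x.1) →
        rest.map (fun kv' => ((kv' : String × String).1,
          if PySem.Set.contains F1 kv'.1 then "SPAM"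
          else if PySem.Set.contains F2 kv'.1 then "OK" else kv'.2))
        = rest.map (fun kv' => (kv'.1,
          if PySem.Set.contains G1 kv'.1 then "SPAM"
          else if PySem.Set.contains G2 kv'.1 then "OK" else kv'.2)) := by
      intro F1 F2 G1 G2 hF1 hF2
      apply List.map_congr_left
      intro x hx
      rw [hF1 x hx, hF2 x hx]
    have hne_of_mem : ∀ x ∈ rest, (x : String × String).1 ≠ kv.1 := by
      intro x hx he
      exact hknotin (he ▸ List.mem_map_of_mem hx)
    by_cases h1 : kv.2 = "OK" ∧ 0 < a
    · have hf : flipKeys (kv :: rest) a b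
          = (kv.1 :: (flipKeys rest (a - 1) b).1, (flipKeys rest (a - 1) b).2) := by
        simp only [flipKeys]; rw [if_pos h1]
      have hm : mapFlip (kv :: rest) a b = (kv.1, "SPAM") :: mapFlip rest (a - 1) b := by
        simp only [mapFlip]; rw [if_pos h1]
      rw [hf, hm, List.map_cons]
      congr 1
      · simp only
        rw [if_pos ((PySem.Set.contains_iff _ _).mpr (List.mem_cons_self))]
      · rw [htail (kv.1 :: (flipKeys rest (a-1) b).1) (flipKeys rest (a-1) b).2
             (flipKeys rest (a-1) b).1 (flipKeys rest (a-1) b).2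
             (fun x hx => hcontains_cons _ _ (hne_of_mem x hx)) (fun _ _ => rfl)]
        exact ih (a - 1) b hnd'
    · by_cases h2 : kv.2 = "SPAM" ∧ 0 < b
      · have hf : flipKeys (kv :: rest) a b
            = ((flipKeys rest a (b - 1)).1, kv.1 :: (flipKeys rest a (b - 1)).2) := by
          simp only [flipKeys]; rw [if_neg h1, if_pos h2]
        have hm : mapFlip (kv :: rest) a b = (kv.1, "OK") :: mapFlip rest a (b - 1) := by
          simp only [mapFlip]; rw [if_neg h1, if_pos h2]
        rw [hf, hm, List.map_cons]
        congr 1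
        · rw [hcontains_false _ (hnotG a (b-1)).1,
              if_pos ((PySem.Set.contains_iff _ _).mpr (List.mem_cons_self))]
          simp
        · rw [htail (flipKeys rest a (b-1)).1 (kv.1 :: (flipKeys rest a (b-1)).2)
               (flipKeys rest a (b-1)).1 (flipKeys rest a (b-1)).2
               (fun _ _ => rfl) (fun x hx => hcontains_cons _ _ (hne_of_mem x hx))]
          exact ih a (b - 1) hnd'
      · have hf : flipKeys (kv :: rest) a b = flipKeys rest a b := by
          simp only [flipKeys]; rw [if_neg h1, if_neg h2]
        have hm : mapFlip (kv :: rest) a b = kv :: mapFlip rest a b := by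
          simp only [mapFlip]; rw [if_neg h1, if_neg h2]
        rw [hf, hm, List.map_cons]
        congr 1
        · rw [hcontains_false _ (hnotG a b).1, hcontains_false _ (hnotG a b).2]
          simp
        · exact ih a b hnd'

-- A equals the reference pass
theorem a_eq_mapFlip (orig : List (String × String)) (n_fp n_fn : Int)
    (h : (orig.map Prod.fst).Nodup) :
    n_FP_n_FN orig n_fp n_fn = mapFlip orig n_fp n_fn := by
  unfold n_FP_n_FN
  rw [foldA_items n_fp n_fn orig PySem.Dict.empty 0 0 (by simpa using h)]
  simp [show (PySem.Dict.empty : PySem.Dict String String).items = [] from rfl]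

-- B equals the reference pass
theorem b_eq_mapFlip (orig : List (String × String)) (n_fp n_fn : Int)
    (h : (orig.map Prod.fst).Nodup) :
    n_FP_n_FN_alt orig n_fp n_fn = mapFlip orig n_fp n_fn := by
  have hpick : pickFlipSets orig n_fp n_fn = flipKeys orig n_fp n_fn := by
    unfold pickFlipSets
    rw [foldPick_eq n_fp n_fn orig PySem.Set.empty PySem.Set.empty h
        (by intro k _; exact ⟨by simp [PySem.Set.empty], by simp [PySem.Set.empty]⟩)]
    have hlen : PySem.Set.len (PySem.Set.empty : PySem.Set String) = 0 := rfl
    rw [hlen]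
    norm_num [PySem.Set.empty]
  unfold n_FP_n_FN_alt
  rw [hpick]
  unfold emitDict
  rw [PySem.Dict.items_foldl_insert_fresh orig Prod.fst
      (fun kv => (if PySem.Set.contains (flipKeys orig n_fp n_fn).1 kv.1 then "SPAM"
                  else if PySem.Set.contains (flipKeys orig n_fp n_fn).2 kv.1 then "OK" else kv.2))
      PySem.Dict.empty (fun a _ => PySem.Dict.contains_empty _) h]
  rw [show (PySem.Dict.empty : PySem.Dict String String).items = [] from rfl, List.nil_append]
  exact map_flipKeys_eq orig n_fp n_fn h

-- ===== VERDICT (by name: the statement is the Claim_ definition above) =====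
theorem n_FP_n_FN_spec : Claim_equal_n_FP_n_FN := by
  intro orig_dict n_fp n_fn _ hpre
  unfold Spec_n_FP_n_FN
  rw [a_eq_mapFlip orig_dict n_fp n_fn hpre, b_eq_mapFlip orig_dict n_fp n_fn hpre]
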